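-- pv_equiv track=rewrite | github.com/RangelGasharov/Python_Basics | algorithms/edabit_the_primiera.py | get_divided_cards
-- ===== SOURCE A (Python) =====
-- def get_value_card(card):
--     values_dictionary = {"7": 21, "6": 18, "A": 16, "J": 10, "Q": 10, "K": 10, }
--     if card[0] not in values_dictionary:
--         return int(card[0]) + 10
--     return values_dictionary[card[0]]
--
-- def get_divided_cards(cards):
--     new_cards = []
--     temp = []
--     current_type = cards[0][1]
--     for i in range(0, len(cards)):
--         if cards[i][1] == current_type:
--             temp.append(get_value_card(cards[i]))
--         else:
--             current_type = cards[i][1]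
--             new_cards.append(temp)
--             temp = []
--             temp.append(get_value_card(cards[i]))
--         if i == len(cards) - 1:
--             new_cards.append(temp)
--     return new_cards
-- ===== SOURCE B (Python) =====
-- def get_value_card(card):
--     values_dictionary = {"7": 21, "6": 18, "A": 16, "J": 10, "Q": 10, "K": 10, }
--     if card[0] not in values_dictionary:
--         return int(card[0]) + 10
--     return values_dictionary[card[0]]
--
-- def get_divided_cards(cards):
--     # recursively split off the leading run of same-suit cards
--     if not cards:
--         return []
--     suit = cards[0][1]
--     i = 1
--     while i < len(cards) and cards[i][1] == suit:
--         i += 1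
--     return [[get_value_card(c) for c in cards[:i]]] + get_divided_cards(cards[i:])
-- ===== Notes on version B (the rewrite author's own statement) =====
-- stated objective: simpler
-- what changed: Replaces the index loop with its temp/current_type sentinel state and last-index check by a recursion that splits off the leading same-suit run and recurses on the rest.
import Mathlib
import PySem

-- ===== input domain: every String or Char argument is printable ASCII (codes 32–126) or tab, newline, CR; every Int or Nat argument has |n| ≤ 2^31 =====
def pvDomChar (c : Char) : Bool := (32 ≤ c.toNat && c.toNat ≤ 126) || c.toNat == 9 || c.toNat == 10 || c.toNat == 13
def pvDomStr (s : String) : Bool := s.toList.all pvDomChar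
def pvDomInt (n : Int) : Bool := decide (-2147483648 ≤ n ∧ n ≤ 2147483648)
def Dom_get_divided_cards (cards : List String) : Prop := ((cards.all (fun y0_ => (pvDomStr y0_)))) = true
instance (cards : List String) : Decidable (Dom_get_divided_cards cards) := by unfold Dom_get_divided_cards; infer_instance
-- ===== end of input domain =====

-- B replaces A's index loop with temp/current_type sentinel state by a recursion that
-- splits off the leading same-suit run and recurses on the rest (objective: simpler).

-- ===== PORT A =====
-- shared helper of the module, used unchanged by both implementations
def get_value_card (card : String) : Int :=
  let vd : PySem.Dict Char Int :=
    PySem.Dict.ofList [('7', 21), ('6', 18), ('A', 16), ('J', 10), ('Q', 10), ('K', 10)]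
  let c0 : Char := (PySem.Str.pyGet? card 0).getD ' '   -- Pre_ keeps the index in range
  if !(vd.contains c0) then (PySem.Int.ofChars? [c0]).getD 0 + 10   -- Pre_ keeps int() succeeding
  else vd.getD c0 0

-- state = (new_cards, temp, current_type); loop over range(0, len(cards))
def get_divided_cards (cards : List String) : List (List Int) :=
  ((PySem.List.pyRange 0 (cards.length : Int) 1).foldl
    (fun st i =>
      let ci := PySem.List.pyGetD cards i ""   -- Pre_ keeps i in range
      let st' :=
        if PySem.Str.pyGet? ci 1 == st.2.2 then (st.1, st.2.1 ++ [get_value_card ci], st.2.2)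
        else (st.1 ++ [st.2.1], [get_value_card ci], PySem.Str.pyGet? ci 1)
      if i == (cards.length : Int) - 1 then (st'.1 ++ [st'.2.1], st'.2.1, st'.2.2) else st')
    ([], [], PySem.Str.pyGet? (PySem.List.pyGetD cards 0 "") 1)).1

-- ===== PORT B =====
-- structural recursion on a fuel bound (fuel starts at cards.length, so it is never exhausted)
def pvAltGo : Nat → List String → List (List Int)
  | _, [] => []
  | 0, _ :: _ => []
  | fuel + 1, c :: t =>
    let suit := PySem.Str.pyGet? c 1
    ((c :: t.takeWhile (fun x => PySem.Str.pyGet? x 1 == suit)).map get_value_card)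
      :: pvAltGo fuel (t.dropWhile (fun x => PySem.Str.pyGet? x 1 == suit))

def get_divided_cards_alt (cards : List String) : List (List Int) :=
  pvAltGo cards.length cards

-- ===== PRECONDITION & SPEC =====
-- Pre_ = exactly the inputs where Python A returns: a nonempty list whose cards all have a
-- second character (card[1]) and a first character that is a face key or parses as an int.
def Pre_get_divided_cards (cards : List String) : Prop :=
  cards ≠ [] ∧ ∀ c ∈ cards, 2 ≤ c.toList.length ∧
    (c.toList.headD ' ' ∈ ['7', '6', 'A', 'J', 'Q', 'K'] ∨
      (PySem.Int.ofChars? [c.toList.headD ' ']).isSome)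
instance (cards : List String) : Decidable (Pre_get_divided_cards cards) := by
  unfold Pre_get_divided_cards; infer_instance

def pvWitness_get_divided_cards : List String := (["7H", "8H", "AS", "KS", "2D"])

def Spec_get_divided_cards (cards : List String) (out : List (List Int)) : Prop := out = get_divided_cards_alt cards
instance (cards : List String) (out : List (List Int)) : Decidable (Spec_get_divided_cards cards out) := by unfold Spec_get_divided_cards; infer_instance

-- ===== CLAIM (what is proved, stated in full; the proofs are below) =====
def Claim_equal_get_divided_cards : Prop := ∀ (cards : List String), Dom_get_divided_cards cards → Pre_get_divided_cards cards → Spec_get_divided_cards cards (get_divided_cards cards)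

-- ===== LEMMAS AND PROOFS =====

-- the suit key, as both ports compute it
def pvKey (x : String) : Option Char := PySem.Str.pyGet? x 1

-- A's per-element step, with the last-index bookkeeping stripped off
def pvStep (st : List (List Int) × List Int × Option Char) (x : String) :
    List (List Int) × List Int × Option Char :=
  if pvKey x == st.2.2 then (st.1, st.2.1 ++ [get_value_card x], st.2.2)
  else (st.1 ++ [st.2.1], [get_value_card x], pvKey x)

-- the grouping A's fold performs, written as structural recursion
def pvRuns (cur : Option Char) (temp : List Int) : List String → List (List Int)
  | [] => [temp]
  | x :: t =>
    if pvKey x == cur then pvRuns cur (temp ++ [get_value_card x]) t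
    else temp :: pvRuns (pvKey x) [get_value_card x] t

theorem pvAltGo_nil (fuel : Nat) : pvAltGo fuel [] = [] := by cases fuel <;> rfl

theorem pvFoldl_step (xs : List String) :
    ∀ (new : List (List Int)) (temp : List Int) (cur : Option Char),
      (xs.foldl pvStep (new, temp, cur)).1 ++ [(xs.foldl pvStep (new, temp, cur)).2.1]
        = new ++ pvRuns cur temp xs := by
  induction xs with
  | nil => intro new temp cur; simp [pvRuns]
  | cons x t ih =>
    intro new temp cur
    by_cases h : (pvKey x == cur) = true
    · simp [pvStep, pvRuns, h, ih]
    · simp only [Bool.not_eq_true] at h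
      simp [pvStep, pvRuns, h, ih]

theorem pvRuns_eq_go (t : List String) :
    ∀ (cur : Option Char) (temp : List Int) (fuel : Nat), t.length ≤ fuel →
      pvRuns cur temp t
        = (temp ++ (t.takeWhile (fun x => pvKey x == cur)).map get_value_card)
            :: pvAltGo fuel (t.dropWhile (fun x => pvKey x == cur)) := by
  induction t with
  | nil => intro cur temp fuel _; simp [pvRuns, pvAltGo_nil]
  | cons x t ih =>
    intro cur temp fuel hf
    by_cases h : (pvKey x == cur) = true
    · simp only [pvRuns, h, List.takeWhile_cons, List.dropWhile_cons]
      rw [ih cur (temp ++ [get_value_card x]) fuel (by simpa using Nat.le_of_succ_le hf)]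
      simp
    · simp only [Bool.not_eq_true] at h
      obtain ⟨f, rfl⟩ : ∃ f, fuel = f + 1 := by
        cases fuel with
        | zero => simp at hf
        | succ f => exact ⟨f, rfl⟩
      simp only [pvRuns, h, List.takeWhile_cons, List.dropWhile_cons, Bool.false_eq_true,
        if_false]
      rw [ih (pvKey x) [get_value_card x] f (by simpa using Nat.lt_succ_iff.mp hf)]
      simp [pvAltGo, pvKey]

theorem pvA_eq_runs (c : String) (t : List String) :
    get_divided_cards (c :: t) = pvRuns (pvKey c) [] (c :: t) := by
  unfold get_divided_cards
  have hsplit : PySem.List.pyRange 0 ((c :: t).length : Int) 1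
      = PySem.List.pyRange 0 (t.length : Int) 1 ++ [(t.length : Int)] := by
    have hc : ((c :: t).length : Int) = (t.length : Int) + 1 := by
      push_cast [List.length_cons]; ring
    rw [hc]
    exact PySem.List.pyRange_one_succ_right (Int.natCast_nonneg _)
  rw [hsplit, List.foldl_append]
  have hlast : PySem.List.pyGetD (c :: t) (t.length : Int) "" = (c :: t)[t.length] := by
    rw [PySem.List.pyGetD_eq_getElem (c :: t) "" (Int.natCast_nonneg _) (by simp)]
    simp only [Int.toNat_natCast]
    rfl
  have hbody : (PySem.List.pyRange 0 (t.length : Int) 1).foldl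
      (fun st i =>
        let ci := PySem.List.pyGetD (c :: t) i ""
        let st' :=
          if PySem.Str.pyGet? ci 1 == st.2.2 then (st.1, st.2.1 ++ [get_value_card ci], st.2.2)
          else (st.1 ++ [st.2.1], [get_value_card ci], PySem.Str.pyGet? ci 1)
        if i == ((c :: t).length : Int) - 1 then (st'.1 ++ [st'.2.1], st'.2.1, st'.2.2) else st')
      ([], [], PySem.Str.pyGet? (PySem.List.pyGetD (c :: t) 0 "") 1)
      = (PySem.List.pyRange 0 (t.length : Int) 1).foldl
        (fun st i => pvStep st (PySem.List.pyGetD ((c :: t).dropLast) i ""))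
        ([], [], PySem.Str.pyGet? (PySem.List.pyGetD (c :: t) 0 "") 1) := by
    apply PySem.List.foldl_congr_mem
    intro acc i hi
    obtain ⟨h0, h1⟩ := (PySem.List.mem_pyRange_one).mp hi
    have hne : (i == ((c :: t).length : Int) - 1) = false := by
      simp only [beq_eq_false_iff_ne, ne_eq, List.length_cons]
      push_cast; omega
    have hget : PySem.List.pyGetD (c :: t) i "" = PySem.List.pyGetD ((c :: t).dropLast) i "" := by
      rw [PySem.List.pyGetD_eq_getElem (c :: t) "" h0 (by simp; omega),
          PySem.List.pyGetD_eq_getElem ((c :: t).dropLast) "" h0 (by simp; omega)]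
      simp [List.getElem_dropLast]
    simp only [hne, hget, pvStep, pvKey, Bool.false_eq_true, if_false]
  rw [hbody]
  rw [show PySem.List.pyRange 0 (t.length : Int) 1
      = PySem.List.pyRange 0 (((c :: t).dropLast.length : Nat) : Int) 1 from by simp]
  rw [PySem.List.foldl_pyRange_zero_pyGetD' ((c :: t).dropLast) "" pvStep
      ([], [], PySem.Str.pyGet? (PySem.List.pyGetD (c :: t) 0 "") 1)]
  have htrue : ((t.length : Int) == ((c :: t).length : Int) - 1) = true := by
    simp [List.length_cons]
  simp only [List.foldl_cons, List.foldl_nil, htrue, if_true, hlast]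
  rw [show PySem.Str.pyGet? (PySem.List.pyGetD (c :: t) 0 "") 1 = pvKey c from by
    rw [PySem.List.pyGetD_zero_cons]; rfl]
  show (pvStep (List.foldl pvStep ([], [], pvKey c) (c :: t).dropLast) ((c :: t)[t.length])).1
      ++ [(pvStep (List.foldl pvStep ([], [], pvKey c) (c :: t).dropLast) ((c :: t)[t.length])).2.1]
      = pvRuns (pvKey c) [] (c :: t)
  have key : ∀ (x : String),
      (pvStep (List.foldl pvStep ([], [], pvKey c) (c :: t).dropLast) x).1
        ++ [(pvStep (List.foldl pvStep ([], [], pvKey c) (c :: t).dropLast) x).2.1]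
        = pvRuns (pvKey c) [] ((c :: t).dropLast ++ [x]) := by
    intro x
    simpa [List.foldl_append] using pvFoldl_step ((c :: t).dropLast ++ [x]) [] [] (pvKey c)
  rw [key]
  congr 1
  conv_rhs => rw [← List.dropLast_append_getLast (l := c :: t) (by simp)]
  congr 1
  rw [List.getLast_eq_getElem]
  congr 1

theorem pvA_eq_alt (cards : List String) (h : cards ≠ []) :
    get_divided_cards cards = get_divided_cards_alt cards := by
  match cards, h with
  | c :: t, _ =>
    rw [pvA_eq_runs]
    rw [show pvRuns (pvKey c) [] (c :: t) = pvRuns (pvKey c) [get_value_card c] t from by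
      simp [pvRuns]]
    rw [pvRuns_eq_go t (pvKey c) [get_value_card c] t.length le_rfl]
    simp [get_divided_cards_alt, pvAltGo, pvKey]

-- ===== VERDICT (by name: the statement is the Claim_ definition above) =====
theorem get_divided_cards_spec : Claim_equal_get_divided_cards := by
  intro cards _ hpre
  exact pvA_eq_alt cards hpre.1
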